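-- pv_equiv track=rewrite | github.com/Wanna101/CSCI-406-Algorithms- | dp_project.py | timber_bp
-- ===== SOURCE A (Python) =====
-- def timber_bp(list_nums):
--     n = len(list_nums)
--     bp_table = [[(0, '') for _ in range(n)] for _ in range(n)]
--     total_lengths = calculate_total_lengths(list_nums)
--
--     for i in range(n):
--         bp_table[i][i] = (list_nums[i], '')
--
--     for length in range(2, n + 1): # this is for seg. of len 2 to n
--         for i in range(n - length + 1):
--             j = i + length - 1
--
--             # calculates total sum of the lengths if player takes i
--             take_i = list_nums[i] + total_lengths[j + 1] - total_lengths[i + 1] - bp_table[i + 1][j][0]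
--             # calculates total sum of the lengths if player takes j
--             take_j = list_nums[j] + total_lengths[j] - total_lengths[i] - bp_table[i][j - 1][0]
--
--             bp_table[i][j] = (take_i, 'left') if take_i >= take_j else (take_j, 'right')
--     return bp_table[0][n - 1][0], bp_table
--
-- def calculate_total_lengths(segments):
--     total_lengths = [0]
--     for segment in segments:
--         total_lengths.append(total_lengths[-1] + segment)
--     return total_lengths
-- ===== SOURCE B (Python) =====
-- def timber_bp(list_nums):
--     n = len(list_nums)
--     prefix = [0]
--     for x in list_nums:
--         prefix.append(prefix[-1] + x)
--     memo = {}
--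
--     def solve(i, j):
--         if (i, j) in memo:
--             return memo[(i, j)]
--         if i == j:
--             cell = (list_nums[i], '')
--         else:
--             take_i = list_nums[i] + prefix[j + 1] - prefix[i + 1] - solve(i + 1, j)[0]
--             take_j = list_nums[j] + prefix[j] - prefix[i] - solve(i, j - 1)[0]
--             cell = (take_i, 'left') if take_i >= take_j else (take_j, 'right')
--         memo[(i, j)] = cell
--         return cell
--
--     table = [[solve(i, j) if i <= j else (0, '') for j in range(n)] for i in range(n)]
--     return table[0][n - 1][0], table
-- ===== Notes on version B (the rewrite author's own statement) =====
-- stated objective: alternative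
-- what changed: Replaces the bottom-up length-by-length table fill with top-down memoized recursion solve(i,j); the table is then produced by tabulating solve over all i<=j.
import Mathlib
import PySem

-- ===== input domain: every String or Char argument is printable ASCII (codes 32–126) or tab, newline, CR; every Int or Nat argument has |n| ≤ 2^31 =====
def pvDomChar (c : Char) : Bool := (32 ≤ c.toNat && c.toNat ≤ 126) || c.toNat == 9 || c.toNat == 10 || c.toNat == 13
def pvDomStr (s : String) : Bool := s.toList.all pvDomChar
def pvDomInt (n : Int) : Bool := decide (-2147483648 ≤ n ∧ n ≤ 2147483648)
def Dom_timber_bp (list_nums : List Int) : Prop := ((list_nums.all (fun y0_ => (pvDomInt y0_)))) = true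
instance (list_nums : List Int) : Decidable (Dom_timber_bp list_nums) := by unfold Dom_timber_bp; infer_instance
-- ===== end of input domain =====

-- B replaces A's bottom-up table fill with top-down recursion solve(i,j) (objective: alternative);
-- equivalence is about the return value (A mutates only its own local table).

-- ===== PORT A =====
-- Python: calculate_total_lengths
def calculate_total_lengths (segments : List Int) : List Int :=
  segments.foldl (fun acc seg => acc ++ [acc.getLastD 0 + seg]) [0]

-- bp_table[i][j] = v  (row update on a list-of-lists)
def pvSet2 (t : List (List (Int × String))) (i j : Nat) (v : Int × String) :
    List (List (Int × String)) :=
  t.set i ((t.getD i []).set j v)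

-- body of A's inner loop, with j = i + length - 1, take_i and take_j inlined
-- (every index read is in range on every executed iteration, so getD is exact)
def timberStep (nums total : List Int) (length i : Nat)
    (t : List (List (Int × String))) : List (List (Int × String)) :=
  pvSet2 t i (i + length - 1)
    (if nums.getD i 0 + total.getD (i + length - 1 + 1) 0 - total.getD (i+1) 0
          - ((t.getD (i+1) []).getD (i + length - 1) ((0:Int),"")).1
        ≥ nums.getD (i + length - 1) 0 + total.getD (i + length - 1) 0 - total.getD i 0
          - ((t.getD i []).getD (i + length - 1 - 1) ((0:Int),"")).1
     then (nums.getD i 0 + total.getD (i + length - 1 + 1) 0 - total.getD (i+1) 0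
            - ((t.getD (i+1) []).getD (i + length - 1) ((0:Int),"")).1, "left")
     else (nums.getD (i + length - 1) 0 + total.getD (i + length - 1) 0 - total.getD i 0
            - ((t.getD i []).getD (i + length - 1 - 1) ((0:Int),"")).1, "right"))

-- A's loop over i for a fixed segment length
def timberLen (nums total : List Int) (t : List (List (Int × String))) (length : Nat) :
    List (List (Int × String)) :=
  (List.range (nums.length - length + 1)).foldl (fun t i => timberStep nums total length i t) t

def timber_bp (list_nums : List Int) : Int × (List (List (Int × String))) :=
  let n := list_nums.length
  let bp0 : List (List (Int × String)) := List.replicate n (List.replicate n ((0:Int), ""))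
  let total := calculate_total_lengths list_nums
  let bp1 := (List.range n).foldl (fun t i => pvSet2 t i i (list_nums.getD i 0, "")) bp0
  let bp2 := (List.range' 2 (n + 1 - 2)).foldl (timberLen list_nums total) bp1
  (((bp2.getD 0 []).getD (n-1) ((0:Int),"")).1, bp2)

-- ===== PORT B =====
-- B's prefix-sum loop (same loop as Source B's 'prefix')
def pvPrefix (segments : List Int) : List Int :=
  segments.foldl (fun acc x => acc ++ [acc.getLastD 0 + x]) [0]

-- Source B's solve(i,j); the memo dict is an evaluation cache only, and since solve is only
-- called with i ≤ j the guard 'j ≤ i' covers exactly the i == j base case.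
def pvSolve (nums pre : List Int) (i j : Nat) : Int × String :=
  if h : j ≤ i then (nums.getD i 0, "")
  else
    if nums.getD i 0 + pre.getD (j+1) 0 - pre.getD (i+1) 0 - (pvSolve nums pre (i+1) j).1
        ≥ nums.getD j 0 + pre.getD j 0 - pre.getD i 0 - (pvSolve nums pre i (j-1)).1
    then (nums.getD i 0 + pre.getD (j+1) 0 - pre.getD (i+1) 0 - (pvSolve nums pre (i+1) j).1, "left")
    else (nums.getD j 0 + pre.getD j 0 - pre.getD i 0 - (pvSolve nums pre i (j-1)).1, "right")
  termination_by j - i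
  decreasing_by
  · exact Nat.sub_succ_lt_self j i (Nat.lt_of_not_le h)
  · have e : j - 1 - i = j - (i + 1) := by rw [Nat.sub_sub, Nat.add_comm]
    exact e ▸ Nat.sub_succ_lt_self j i (Nat.lt_of_not_le h)

def timber_bp_alt (list_nums : List Int) : Int × (List (List (Int × String))) :=
  let n := list_nums.length
  let pre := pvPrefix list_nums
  let table := (List.range n).map (fun i => (List.range n).map (fun j =>
      if i ≤ j then pvSolve list_nums pre i j else ((0:Int), "")))
  (((table.getD 0 []).getD (n-1) ((0:Int),"")).1, table)

-- ===== PRECONDITION & SPEC =====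
-- Pre_ excludes only the empty list, on which Python A (and B) raise IndexError.
def Pre_timber_bp (list_nums : List Int) : Prop := list_nums ≠ []
instance (list_nums : List Int) : Decidable (Pre_timber_bp list_nums) := by
  unfold Pre_timber_bp; infer_instance
def pvWitness_timber_bp : List Int := ([3, 1, 4, 1, 5] : List Int)

def Spec_timber_bp (list_nums : List Int) (out : Int × (List (List (Int × String)))) : Prop := out = timber_bp_alt list_nums
instance (list_nums : List Int) (out : Int × (List (List (Int × String)))) : Decidable (Spec_timber_bp list_nums out) := by unfold Spec_timber_bp; infer_instance

-- ===== CLAIM (what is proved, stated in full; the proofs are below) =====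
def Claim_equal_timber_bp : Prop := ∀ (list_nums : List Int), Dom_timber_bp list_nums → Pre_timber_bp list_nums → Spec_timber_bp list_nums (timber_bp list_nums)

-- ===== LEMMAS AND PROOFS =====

-- tabulation of an n×n table from a cell function
def tab (n : Nat) (f : Nat → Nat → Int × String) : List (List (Int × String)) :=
  (List.range n).map (fun i => (List.range n).map (fun j => f i j))

-- the cells A has filled after all segment lengths ≤ L have been processed
def cellFn (nums pre : List Int) (L i j : Nat) : Int × String :=
  if i ≤ j ∧ j < i + L then pvSolve nums pre i j else ((0:Int), "")

lemma tab_getD {n : Nat} (f : Nat → Nat → Int × String) {i : Nat} (hi : i < n) :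
    (tab n f).getD i [] = (List.range n).map (f i) := by
  rw [List.getD_eq_getElem _ _ (by simpa [tab] using hi)]
  simp [tab]

lemma tab_getD2 {n : Nat} (f : Nat → Nat → Int × String) {i j : Nat}
    (hi : i < n) (hj : j < n) :
    ((tab n f).getD i []).getD j ((0:Int),"") = f i j := by
  rw [tab_getD f hi, List.getD_eq_getElem _ _ (by simpa using hj)]
  simp

lemma tab_congr {n : Nat} {f g : Nat → Nat → Int × String}
    (h : ∀ i < n, ∀ j < n, f i j = g i j) : tab n f = tab n g := by
  unfold tab
  apply List.map_congr_left
  intro i hi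
  apply List.map_congr_left
  intro j hj
  exact h i (List.mem_range.mp hi) j (List.mem_range.mp hj)

lemma tab_set {n i j : Nat} (hi : i < n) (_hj : j < n)
    (f : Nat → Nat → Int × String) (v : Int × String) :
    pvSet2 (tab n f) i j v = tab n (fun a b => if a = i ∧ b = j then v else f a b) := by
  unfold pvSet2
  rw [tab_getD f hi]
  apply List.ext_getElem
  · simp [tab]
  · intro k hk hk'
    have hkn : k < n := by simpa [tab] using hk
    rw [List.getElem_set]
    by_cases hki : i = k
    · subst hki
      rw [if_pos rfl]
      apply List.ext_getElem
      · simp [tab]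
      · intro m hm hm'
        have hmn : m < n := by simpa [tab] using hm
        rw [List.getElem_set]
        by_cases hmj : j = m
        · subst hmj
          simp [tab]
        · rw [if_neg hmj]
          simp only [tab, List.getElem_map, List.getElem_range]
          rw [if_neg (fun h => hmj h.2.symm)]
    · rw [if_neg hki]
      simp only [tab, List.getElem_map, List.getElem_range]
      apply List.map_congr_left
      intro m _
      rw [if_neg (fun h => hki h.1.symm)]

lemma replicate_eq_tab (n : Nat) :
    List.replicate n (List.replicate n ((0:Int), "")) = tab n (fun _ _ => ((0:Int), "")) := by
  simp [tab, List.map_const']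

lemma diag_fold (nums : List Int) (n k : Nat) (hk : k ≤ n) :
    (List.range k).foldl (fun t i => pvSet2 t i i (nums.getD i 0, ""))
        (tab n (fun _ _ => ((0:Int), ""))) =
      tab n (fun i j => if i = j ∧ i < k then (nums.getD i 0, "") else ((0:Int), "")) := by
  induction k with
  | zero =>
      simp only [List.range_zero, List.foldl_nil]
      apply tab_congr; intro i _ j _; simp
  | succ k ih =>
      rw [List.range_succ, List.foldl_append, ih (by omega), List.foldl_cons, List.foldl_nil,
        tab_set (by omega) (by omega)]
      apply tab_congr
      intro i _ j _
      by_cases h : i = k ∧ j = k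
      · obtain ⟨rfl, rfl⟩ := h; simp
      · rw [if_neg h]
        by_cases h2 : i = j ∧ i < k
        · obtain ⟨rfl, hlt⟩ := h2
          rw [if_pos ⟨rfl, hlt⟩, if_pos ⟨rfl, by omega⟩]
        · have h3 : ¬ (i = j ∧ i < k + 1) := by
            rintro ⟨rfl, hlt⟩
            rcases Nat.lt_succ_iff_lt_or_eq.mp hlt with h' | rfl
            · exact h2 ⟨rfl, h'⟩
            · exact h ⟨rfl, rfl⟩
          rw [if_neg h2, if_neg h3]

lemma pvSolve_base (nums pre : List Int) (i : Nat) :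
    pvSolve nums pre i i = (nums.getD i 0, "") := by
  rw [pvSolve]; simp

lemma pvSolve_step (nums pre : List Int) {i j : Nat} (hij : i < j) :
    pvSolve nums pre i j =
      if nums.getD i 0 + pre.getD (j+1) 0 - pre.getD (i+1) 0 - (pvSolve nums pre (i+1) j).1
          ≥ nums.getD j 0 + pre.getD j 0 - pre.getD i 0 - (pvSolve nums pre i (j-1)).1
      then (nums.getD i 0 + pre.getD (j+1) 0 - pre.getD (i+1) 0 - (pvSolve nums pre (i+1) j).1, "left")
      else (nums.getD j 0 + pre.getD j 0 - pre.getD i 0 - (pvSolve nums pre i (j-1)).1, "right") := by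
  rw [pvSolve, dif_neg (by omega)]

lemma inner_fold (nums total : List Int) (L : Nat) (hL2 : 2 ≤ L) (hLn : L ≤ nums.length)
    (k : Nat) (hk : k ≤ nums.length - L + 1) :
    (List.range k).foldl (fun t i => timberStep nums total L i t)
        (tab nums.length (cellFn nums total (L-1))) =
      tab nums.length (fun i j =>
        if i < k ∧ j = i + L - 1 then pvSolve nums total i j
        else cellFn nums total (L-1) i j) := by
  induction k with
  | zero =>
      simp only [List.range_zero, List.foldl_nil]
      apply tab_congr; intro i _ j _; simp
  | succ k ih =>
      rw [List.range_succ, List.foldl_append, ih (by omega), List.foldl_cons, List.foldl_nil]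
      have hkn : k < nums.length := by omega
      have hj : k + L - 1 < nums.length := by omega
      have hk1 : k + 1 < nums.length := by omega
      unfold timberStep
      rw [tab_getD2 _ hk1 hj, tab_getD2 _ hkn (show k + L - 1 - 1 < nums.length by omega)]
      have hr1 : (if k + 1 < k ∧ k + L - 1 = (k+1) + L - 1 then pvSolve nums total (k+1) (k + L - 1)
          else cellFn nums total (L-1) (k+1) (k + L - 1)) = pvSolve nums total (k+1) (k + L - 1) := by
        rw [if_neg (by omega), cellFn, if_pos ⟨by omega, by omega⟩]
      have hr2 : (if k < k ∧ k + L - 1 - 1 = k + L - 1 then pvSolve nums total k (k + L - 1 - 1)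
          else cellFn nums total (L-1) k (k + L - 1 - 1)) = pvSolve nums total k (k + L - 1 - 1) := by
        rw [if_neg (by omega), cellFn, if_pos ⟨by omega, by omega⟩]
      rw [hr1, hr2, tab_set hkn hj]
      apply tab_congr
      intro i hi j hjn
      by_cases hcell : i = k ∧ j = k + L - 1
      · obtain ⟨rfl, rfl⟩ := hcell
        rw [if_pos (show i = i ∧ i + L - 1 = i + L - 1 from ⟨rfl, rfl⟩),
          if_pos (show i < i + 1 ∧ i + L - 1 = i + L - 1 from ⟨by omega, rfl⟩),
          pvSolve_step nums total (show i < i + L - 1 by omega)]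
      · rw [if_neg hcell]
        by_cases h2 : i < k ∧ j = i + L - 1
        · rw [if_pos h2, if_pos ⟨by omega, h2.2⟩]
        · have h3 : ¬ (i < k + 1 ∧ j = i + L - 1) := by
            rintro ⟨hik, rfl⟩
            rcases Nat.lt_succ_iff_lt_or_eq.mp hik with h' | rfl
            · exact h2 ⟨h', rfl⟩
            · exact hcell ⟨rfl, rfl⟩
          rw [if_neg h2, if_neg h3]

lemma outer_fold (nums total : List Int) (m : Nat) (hm : m + 1 ≤ nums.length) :
    (List.range' 2 m).foldl (timberLen nums total)
        (tab nums.length (cellFn nums total 1)) =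
      tab nums.length (cellFn nums total (m+1)) := by
  induction m with
  | zero => simp
  | succ m ih =>
      rw [List.range'_concat, List.foldl_append, ih (by omega), List.foldl_cons, List.foldl_nil]
      simp only [Nat.one_mul]
      show timberLen nums total (tab nums.length (cellFn nums total (m+1))) (2+m) = _
      unfold timberLen
      have hL1 : 2 + m - 1 = m + 1 := by omega
      have h := inner_fold nums total (2+m) (by omega) (by omega) (nums.length - (2+m) + 1) le_rfl
      rw [hL1] at h
      rw [h]
      apply tab_congr
      intro i hi j hj
      by_cases hc : i < nums.length - (2+m) + 1 ∧ j = i + (2+m) - 1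
      · rw [if_pos hc, cellFn, if_pos ⟨by omega, by omega⟩]
      · rw [if_neg hc]
        unfold cellFn
        by_cases hspan : i ≤ j ∧ j < i + (m+1)
        · rw [if_pos hspan, if_pos ⟨hspan.1, by omega⟩]
        · rw [if_neg hspan, if_neg (by rintro ⟨hij, hlt⟩; exact hc ⟨by omega, by omega⟩)]

lemma htable_eq (nums : List Int) :
    (List.range' 2 (nums.length + 1 - 2)).foldl (timberLen nums (calculate_total_lengths nums))
        ((List.range nums.length).foldl (fun t i => pvSet2 t i i (nums.getD i 0, ""))
          (List.replicate nums.length (List.replicate nums.length ((0:Int), "")))) =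
      tab nums.length (fun i j =>
        if i ≤ j then pvSolve nums (calculate_total_lengths nums) i j else ((0:Int), "")) := by
  have hbp1 : (List.range nums.length).foldl (fun t i => pvSet2 t i i (nums.getD i 0, ""))
        (List.replicate nums.length (List.replicate nums.length ((0:Int), ""))) =
      tab nums.length (cellFn nums (calculate_total_lengths nums) 1) := by
    rw [replicate_eq_tab, diag_fold nums nums.length nums.length le_rfl]
    apply tab_congr
    intro i hi j hj
    unfold cellFn
    by_cases h : i = j
    · subst h
      rw [if_pos ⟨rfl, hi⟩, if_pos ⟨le_rfl, by omega⟩, pvSolve_base]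
    · rw [if_neg (by tauto), if_neg (by rintro ⟨h1, h2⟩; omega)]
  rw [hbp1]
  rcases Nat.eq_zero_or_pos nums.length with h0 | hpos
  · rw [h0]
    simp [tab]
  · have hm : nums.length + 1 - 2 = nums.length - 1 := by omega
    rw [hm, outer_fold nums (calculate_total_lengths nums) (nums.length - 1) (by omega),
      (show nums.length - 1 + 1 = nums.length by omega)]
    apply tab_congr
    intro i hi j hj
    unfold cellFn
    by_cases h : i ≤ j
    · rw [if_pos ⟨h, by omega⟩, if_pos h]
    · rw [if_neg (by tauto), if_neg h]

-- ===== VERDICT (by name: the statement is the Claim_ definition above) =====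
theorem timber_bp_spec : Claim_equal_timber_bp := by
  intro nums _ _
  have hpre : pvPrefix nums = calculate_total_lengths nums := rfl
  simp only [Spec_timber_bp, timber_bp, timber_bp_alt, hpre, htable_eq nums, tab]
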